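-- pv_equiv track=rewrite | github.com/vincent-lg/bui | bui/layout/component.py | deduce_id
-- ===== SOURCE A (Python) =====
-- def deduce_id(deduce_from: str) -> str:
--     """
--     Try and return a deduced identifier.
--
--     An identifier must be a lowercase version of the given data with only
--     letters.  Spaces in the data are replaced with the
--     underscore (_).  A tabulation will break parsing.  Letters are
--     copied as-is.  Non-letter symbols are just ignored.
--
--     Args:
--         deduce_from (str): the origin or the identifier to deduce.
--
--     Examples:
--         >>> Component.deduce_id("click me!")
--         `click_me`
--         >>> Component.deduce_id("Quit\tCTRL + Q")
--         'quit'
--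
--     """
--     identifier = ""
--     for char in deduce_from:
--         if char.isalpha():
--             identifier += char.lower()
--         elif char == " " and not identifier.endswith("_"):
--             identifier += "_"
--         elif char == "\t":
--             break
--
--     return identifier.strip("_")
-- ===== SOURCE B (Python) =====
-- def deduce_id(deduce_from: str) -> str:
--     head = deduce_from.split('\t')[0]
--     normalized = ''.join(c.lower() if c.isalpha() else ' '
--                          for c in head if c.isalpha() or c == ' ')
--     return '_'.join(normalized.split())
-- ===== Notes on version B (the rewrite author's own statement) =====
-- stated objective: idiomatic
-- what changed: Replaces the stateful character loop (conditional underscore append guarded by an endswith check, break on tab, final strip) by a three-stage pipeline: cut the string at the first tab with split, normalize each kept character by a comprehension (letters lowered, spaces kept, everything else dropped), then join the whitespace-split words with underscores.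
import Mathlib
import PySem

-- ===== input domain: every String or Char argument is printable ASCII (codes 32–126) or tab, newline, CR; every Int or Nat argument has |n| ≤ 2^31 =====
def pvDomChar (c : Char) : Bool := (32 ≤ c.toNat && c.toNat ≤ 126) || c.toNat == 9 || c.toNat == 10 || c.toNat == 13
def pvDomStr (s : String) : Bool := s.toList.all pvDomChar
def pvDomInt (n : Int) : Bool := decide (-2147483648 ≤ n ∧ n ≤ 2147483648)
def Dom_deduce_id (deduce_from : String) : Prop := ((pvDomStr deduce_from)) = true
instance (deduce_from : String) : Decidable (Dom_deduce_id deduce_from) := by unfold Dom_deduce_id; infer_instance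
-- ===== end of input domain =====

-- B replaces A's stateful character loop by a cut-at-tab / normalize / split-join pipeline (idiomatic; return value only).

-- ===== PORT A =====
-- A's for-loop with its `identifier` accumulator and the `break` on tab
def deduceLoop : List Char → List Char → List Char
  | identifier, [] => identifier
  | identifier, c :: rest =>
    if PySem.Chars.isalpha c then
      deduceLoop (identifier ++ [PySem.Chars.lowerChar c]) rest
    else if c = ' ' ∧ PySem.Chars.endswith identifier ['_'] = false then
      deduceLoop (identifier ++ ['_']) rest
    else if c = '\t' then
      identifier
    else
      deduceLoop identifier rest

def deduce_id (deduce_from : String) : String :=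
  String.ofList (PySem.Chars.stripChars (deduceLoop [] deduce_from.toList) ['_'])

-- ===== PORT B =====
def deduce_id_alt (deduce_from : String) : String :=
  -- head = deduce_from.split('\t')[0]  (split with a nonempty sep never fails; the first piece always exists)
  let head : List Char := ((PySem.Chars.split? deduce_from.toList ['\t']).getD []).headD []
  -- normalized = ''.join(c.lower() if c.isalpha() else ' ' for c in head if c.isalpha() or c == ' ')
  let normalized : List Char := head.filterMap (fun c =>
    if PySem.Chars.isalpha c then some (PySem.Chars.lowerChar c)
    else if c = ' ' then some ' ' else none)
  -- return '_'.join(normalized.split())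
  String.ofList (PySem.Chars.join ['_'] (PySem.Chars.split₀ normalized))

-- ===== PRECONDITION & SPEC =====
def Spec_deduce_id (deduce_from : String) (out : String) : Prop := out = deduce_id_alt deduce_from
instance (deduce_from : String) (out : String) : Decidable (Spec_deduce_id deduce_from out) := by unfold Spec_deduce_id; infer_instance

-- ===== CLAIM (what is proved, stated in full; the proofs are below) =====
def Claim_equal_deduce_id : Prop := ∀ (deduce_from : String), Dom_deduce_id deduce_from → Spec_deduce_id deduce_from (deduce_id deduce_from)

-- ===== LEMMAS AND PROOFS =====

-- state machine equivalent to A's loop body (b = identifier currently ends with '_')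
def gRun (b : Bool) : List Char → List Char
  | [] => []
  | c :: t =>
    if PySem.Chars.isalpha c then PySem.Chars.lowerChar c :: gRun false t
    else if c = ' ' then (if b then gRun true t else '_' :: gRun true t)
    else if c = '\t' then []
    else gRun b t

-- the same machine over the normalized alphabet (letters and spaces only)
def g2 (b : Bool) : List Char → List Char
  | [] => []
  | c :: t => if c = ' ' then (if b then g2 true t else '_' :: g2 true t) else c :: g2 false t

def normB (cs : List Char) : List Char := cs.filterMap (fun c =>
  if PySem.Chars.isalpha c then some (PySem.Chars.lowerChar c)
  else if c = ' ' then some ' ' else none)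

def CharOK (c : Char) : Prop := c = ' ' ∨ (97 ≤ c.toNat ∧ c.toNat ≤ 122)

def pU : Char → Bool := fun c => List.contains ['_'] c

theorem charOfNat_toNat (n : Nat) (h : n < 1000) : (Char.ofNat n).toNat = n := by
  unfold Char.ofNat
  rw [dif_pos (by unfold Nat.isValidChar; omega)]
  simp [Char.toNat, Char.ofNatAux]

theorem lower_range (c : Char) (h : PySem.Chars.isalpha c = true) :
    97 ≤ (PySem.Chars.lowerChar c).toNat ∧ (PySem.Chars.lowerChar c).toNat ≤ 122 := by
  unfold PySem.Chars.lowerChar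
  by_cases hu : PySem.Chars.isupper c = true
  · have hb : 65 ≤ c.toNat ∧ c.toNat ≤ 90 := by
      simp [PySem.Chars.isupper, Char.le_def, UInt32.le_iff_toNat_le] at hu
      exact hu
    rw [if_pos hu, charOfNat_toNat _ (by omega)]
    omega
  · have hl : PySem.Chars.islower c = true := by
      unfold PySem.Chars.isalpha at h
      rcases Bool.or_eq_true_iff.mp h with h' | h'
      · exact absurd h' hu
      · exact h'
    have hb : 97 ≤ c.toNat ∧ c.toNat ≤ 122 := by
      simp [PySem.Chars.islower, Char.le_def, UInt32.le_iff_toNat_le] at hl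
      exact hl
    rw [if_neg hu]
    exact hb

theorem ne_of_toNat (c d : Char) (h : c.toNat ≠ d.toNat) : c ≠ d := fun e => h (by rw [e])

theorem pU_false (c : Char) (h : 97 ≤ c.toNat) : pU c = false := by
  simp [pU]
  exact fun e => by simp [e] at h

theorem charOK_letter (c : Char) (h : CharOK c) (h2 : c ≠ ' ') :
    97 ≤ c.toNat ∧ c.toNat ≤ 122 := by
  rcases h with h | h
  · exact absurd h h2
  · exact h

theorem letter_not_space (c : Char) (h : 97 ≤ c.toNat ∧ c.toNat ≤ 122) :
    PySem.Chars.isspace c = false := by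
  simp [PySem.Chars.isspace]; omega

theorem normB_ok (cs : List Char) : ∀ c ∈ normB cs, CharOK c := by
  intro c hc
  rw [normB, List.mem_filterMap] at hc
  obtain ⟨a, _, ha⟩ := hc
  by_cases h1 : PySem.Chars.isalpha a = true
  · rw [if_pos h1, Option.some_inj] at ha
    exact Or.inr (ha ▸ lower_range a h1)
  · rw [if_neg h1] at ha
    by_cases h2 : a = ' '
    · rw [if_pos h2, Option.some_inj] at ha
      exact Or.inl ha.symm
    · rw [if_neg h2] at ha; exact absurd ha (by simp)


theorem endswith_append (acc : List Char) (x : Char) :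
    PySem.Chars.endswith (acc ++ [x]) ['_'] = (x == '_') := by
  simp [PySem.Chars.endswith, List.isSuffixOf, List.isPrefixOf]
  exact eq_comm

theorem deduceLoop_eq (cs : List Char) : ∀ acc,
    deduceLoop acc cs = acc ++ gRun (PySem.Chars.endswith acc ['_']) cs := by
  induction cs with
  | nil => intro acc; simp [deduceLoop, gRun]
  | cons c t ih =>
    intro acc
    simp only [deduceLoop, gRun]
    by_cases ha : PySem.Chars.isalpha c = true
    · rw [if_pos ha, if_pos ha, ih, endswith_append]
      have h2 : (PySem.Chars.lowerChar c == '_') = false := by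
        have := lower_range c ha
        simp; exact ne_of_toNat _ _ (by simp; omega)
      rw [h2]; simp
    · rw [if_neg ha, if_neg ha]
      by_cases hs : c = ' '
      · rw [if_pos hs]
        by_cases he : PySem.Chars.endswith acc ['_'] = false
        · rw [if_pos ⟨hs, he⟩, ih, endswith_append, he]
          simp
        · have he' : PySem.Chars.endswith acc ['_'] = true := by
            cases h : PySem.Chars.endswith acc ['_'] <;> simp_all
          rw [if_neg (by tauto), if_neg (by rw [hs]; decide), ih, he']
          simp
      · rw [if_neg hs, if_neg (by tauto)]
        by_cases ht : c = '\t'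
        · rw [if_pos ht, if_pos ht]; simp
        · rw [if_neg ht, if_neg ht, ih]

theorem gRun_takeWhile (cs : List Char) : ∀ b,
    gRun b cs = gRun b (cs.takeWhile (· ≠ '\t')) := by
  induction cs with
  | nil => intro b; rfl
  | cons c t ih =>
    intro b
    by_cases ht : c = '\t'
    · subst ht
      rw [List.takeWhile_cons_of_neg (by simp)]
      simp [gRun]
      decide
    · rw [List.takeWhile_cons_of_pos (by simp [ht])]
      simp only [gRun]
      by_cases ha : PySem.Chars.isalpha c = true
      · rw [if_pos ha, if_pos ha, ih]
      · rw [if_neg ha, if_neg ha]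
        by_cases hs : c = ' '
        · rw [if_pos hs, if_pos hs]
          cases b <;> simp [ih]
        · rw [if_neg hs, if_neg hs, if_neg ht, if_neg ht, ih]

theorem gRun_eq_g2 (cs : List Char) (ht : ∀ c ∈ cs, c ≠ '\t') : ∀ b,
    gRun b cs = g2 b (normB cs) := by
  induction cs with
  | nil => intro b; rfl
  | cons c t ih =>
    intro b
    have htt : ∀ c ∈ t, c ≠ '\t' := fun x hx => ht x (List.mem_cons_of_mem _ hx)
    simp only [gRun, normB, List.filterMap_cons]
    by_cases ha : PySem.Chars.isalpha c = true
    · rw [if_pos ha, if_pos ha]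
      simp only [g2]
      rw [if_neg (ne_of_toNat _ _ (by have := lower_range c ha; simp; omega))]
      rw [ih htt]; rfl
    · rw [if_neg ha, if_neg ha]
      by_cases hs : c = ' '
      · rw [if_pos hs, if_pos hs]
        simp only [g2]
        cases b <;> simp [ih htt, normB]
      · rw [if_neg hs, if_neg hs, if_neg (ht c List.mem_cons_self)]
        exact ih htt b

theorem split0_go_acc (l : List Char) : ∀ cur acc,
    PySem.Chars.split₀.go l cur acc = acc.reverse ++ PySem.Chars.split₀.go l cur [] := by
  induction l with
  | nil =>
    intro cur acc
    simp only [PySem.Chars.split₀.go]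
    by_cases h : cur.isEmpty
    · rw [if_pos h, if_pos h]; simp
    · rw [if_neg h, if_neg h]; simp
  | cons c rest ih =>
    intro cur acc
    simp only [PySem.Chars.split₀.go]
    by_cases h : PySem.Chars.isspace c = true
    · rw [if_pos h, if_pos h]
      by_cases hc : cur.isEmpty
      · rw [if_pos hc, if_pos hc, ih]
      · rw [if_neg hc, if_neg hc, ih [] (cur.reverse :: acc), ih [] [cur.reverse]]
        simp
    · rw [if_neg h, if_neg h, ih]

theorem split0_cons_space (t : List Char) :
    PySem.Chars.split₀ (' ' :: t) = PySem.Chars.split₀ t := by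
  simp only [PySem.Chars.split₀, PySem.Chars.split₀.go]
  rw [if_pos (by decide), if_pos (by decide)]

theorem split0_go_word (w : List Char) (hw : ∀ c ∈ w, PySem.Chars.isspace c = false) :
    ∀ r cur, PySem.Chars.split₀.go (w ++ r) cur [] =
      PySem.Chars.split₀.go r (w.reverse ++ cur) [] := by
  induction w with
  | nil => intro r cur; simp
  | cons c w' ih =>
    intro r cur
    simp only [List.cons_append, PySem.Chars.split₀.go]
    rw [if_neg (by rw [hw c List.mem_cons_self]; simp),
        ih (fun x hx => hw x (List.mem_cons_of_mem _ hx))]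
    simp

theorem split0_word (w r : List Char) (hne : w ≠ [])
    (hw : ∀ c ∈ w, PySem.Chars.isspace c = false)
    (hr : r = [] ∨ ∃ r', r = ' ' :: r') :
    PySem.Chars.split₀ (w ++ r) = w :: PySem.Chars.split₀ r := by
  have h1 : PySem.Chars.split₀ (w ++ r) = PySem.Chars.split₀.go r w.reverse [] := by
    rw [PySem.Chars.split₀, split0_go_word w hw r []]
    simp
  rw [h1]
  have hcne : (w.reverse.isEmpty) = false := by
    cases w with
    | nil => exact absurd rfl hne
    | cons a b => simp
  rcases hr with hr | ⟨r', hr⟩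
  · subst hr
    simp only [PySem.Chars.split₀.go]
    rw [if_neg (by simp [hcne])]
    simp [PySem.Chars.split₀, PySem.Chars.split₀.go]
  · subst hr
    simp only [PySem.Chars.split₀.go]
    rw [if_pos (by decide), if_neg (by simp [hcne]), split0_go_acc]
    simp [split0_cons_space]
    rfl

theorem g2_all_space (n : List Char) (h : ∀ c ∈ n, c = ' ') : g2 true n = [] := by
  induction n with
  | nil => rfl
  | cons c t ih =>
    simp only [g2]
    rw [if_pos (h c List.mem_cons_self)]
    simp [ih (fun x hx => h x (List.mem_cons_of_mem _ hx))]

theorem g2_mem (n : List Char) (c : Char) (hc : c ∈ n) (hs : c ≠ ' ') :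
    ∀ b, c ∈ g2 b n := by
  induction n with
  | nil => exact absurd hc (by simp)
  | cons d t ih =>
    intro b
    simp only [g2]
    by_cases hd : d = ' '
    · rw [if_pos hd]
      have hct : c ∈ t := by
        rcases List.mem_cons.mp hc with h | h
        · exact absurd (h.trans hd) hs
        · exact h
      cases b <;> simp [ih hct]
    · rw [if_neg hd]
      rcases List.mem_cons.mp hc with h | h
      · exact h ▸ List.mem_cons_self
      · exact List.mem_cons_of_mem _ (ih h false)

theorem g2_word (w : List Char) (hne : w ≠ []) (hw : ∀ c ∈ w, c ≠ ' ') :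
    ∀ b r, g2 b (w ++ r) = w ++ g2 false r := by
  induction w with
  | nil => exact absurd rfl hne
  | cons c w' ih =>
    intro b r
    simp only [List.cons_append, g2]
    rw [if_neg (hw c List.mem_cons_self)]
    cases hw' : w' with
    | nil => simp
    | cons a b' =>
      rw [← hw']
      rw [ih (by simp [hw']) (fun x hx => hw x (List.mem_cons_of_mem _ hx)) false r]

theorem g2_space_false (t : List Char) : g2 false (' ' :: t) = '_' :: g2 true t := by
  simp [g2]

theorem g2_space_true (t : List Char) : g2 true (' ' :: t) = g2 true t := by
  simp [g2]

theorem g2_letter (c : Char) (t : List Char) (h : c ≠ ' ') (b : Bool) :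
    g2 b (c :: t) = c :: g2 false t := by
  simp [g2, h]

theorem dropU_g2_true (n : List Char) (hok : ∀ c ∈ n, CharOK c) :
    List.dropWhile pU (g2 true n) = g2 true n := by
  induction n with
  | nil => rfl
  | cons c t ih =>
    have hok' : ∀ x ∈ t, CharOK x := fun x hx => hok x (List.mem_cons_of_mem _ hx)
    by_cases hs : c = ' '
    · rw [hs, g2_space_true, ih hok']
    · rw [g2_letter c t hs, List.dropWhile_cons_of_neg
        (by rw [pU_false c (charOK_letter c (hok c List.mem_cons_self) hs).1]; simp)]

theorem dropU_g2_false (n : List Char) (hok : ∀ c ∈ n, CharOK c) :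
    List.dropWhile pU (g2 false n) = g2 true n := by
  induction n with
  | nil => rfl
  | cons c t ih =>
    have hok' : ∀ x ∈ t, CharOK x := fun x hx => hok x (List.mem_cons_of_mem _ hx)
    by_cases hs : c = ' '
    · rw [hs, g2_space_false, g2_space_true,
          List.dropWhile_cons_of_pos (by simp [pU])]
      exact dropU_g2_true t hok'
    · rw [g2_letter c t hs, g2_letter c t hs, List.dropWhile_cons_of_neg
        (by rw [pU_false c (charOK_letter c (hok c List.mem_cons_self) hs).1]; simp)]

theorem dropWhile_head_false (p : Char → Bool) (l : List Char) :
    ∀ d r, List.dropWhile p l = d :: r → p d = false := by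
  induction l with
  | nil => intro d r h; simp at h
  | cons a t ih =>
    intro d r h
    by_cases ha : p a = true
    · rw [List.dropWhile_cons_of_pos ha] at h; exact ih d r h
    · rw [List.dropWhile_cons_of_neg (by simp [ha])] at h
      cases h
      cases hpa : p a
      · rfl
      · exact absurd hpa ha

theorem dropU_rev_word (w : List Char) (h : ∀ x ∈ w, pU x = false) :
    List.dropWhile pU w.reverse = w.reverse := by
  cases hrev : w.reverse with
  | nil => rfl
  | cons x xs =>
    rw [List.dropWhile_cons_of_neg]
    rw [h x (by rw [← List.mem_reverse, hrev]; exact List.mem_cons_self)]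
    simp

theorem main_lemma (N : Nat) : ∀ n : List Char, n.length ≤ N → (∀ c ∈ n, CharOK c) →
    ((List.dropWhile pU (g2 true n).reverse).reverse
       = PySem.Chars.join ['_'] (PySem.Chars.split₀ n))
    ∧ (PySem.Chars.split₀ n = [] ↔ ∀ c ∈ n, c = ' ') := by
  induction N with
  | zero =>
    intro n hlen _
    have : n = [] := List.eq_nil_of_length_eq_zero (Nat.le_zero.mp hlen)
    subst this
    refine ⟨rfl, by simp [PySem.Chars.split₀, PySem.Chars.split₀.go]⟩
  | succ N ih =>
    intro n hlen hok
    cases n with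
    | nil => refine ⟨rfl, by simp [PySem.Chars.split₀, PySem.Chars.split₀.go]⟩
    | cons c t =>
      have hlt : t.length ≤ N := by simpa using hlen
      have hokt : ∀ x ∈ t, CharOK x := fun x hx => hok x (List.mem_cons_of_mem _ hx)
      by_cases hs : c = ' '
      · subst hs
        obtain ⟨h1, h2⟩ := ih t hlt hokt
        rw [g2_space_true, split0_cons_space]
        exact ⟨h1, by rw [h2]; simp⟩
      · -- word case
        set w : List Char := c :: t.takeWhile (fun d => decide (d ≠ ' ')) with hw_def
        set r : List Char := t.dropWhile (fun d => decide (d ≠ ' ')) with hr_def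
        have hn : c :: t = w ++ r := by
          rw [hw_def, hr_def]; simp [List.takeWhile_append_dropWhile]
        have hwne : w ≠ [] := by simp [hw_def]
        have hwmem : ∀ x ∈ w, x ∈ c :: t := by
          intro x hx
          rcases List.mem_cons.mp hx with h | h
          · exact h ▸ List.mem_cons_self
          · exact List.mem_cons_of_mem _ ((List.takeWhile_sublist _).mem h)
        have hwns : ∀ x ∈ w, x ≠ ' ' := by
          intro x hx
          rcases List.mem_cons.mp hx with h | h
          · exact h ▸ hs
          · have := List.mem_takeWhile_imp h; simpa using this
        have hwletter : ∀ x ∈ w, 97 ≤ x.toNat ∧ x.toNat ≤ 122 := fun x hx =>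
          charOK_letter x (hok x (hwmem x hx)) (hwns x hx)
        have hwnospace : ∀ x ∈ w, PySem.Chars.isspace x = false := fun x hx =>
          letter_not_space x (hwletter x hx)
        have hwpU : ∀ x ∈ w, pU x = false := fun x hx => pU_false x (hwletter x hx).1
        have hrshape : r = [] ∨ ∃ r', r = ' ' :: r' := by
          cases hdr : r with
          | nil => exact Or.inl rfl
          | cons d r' =>
            refine Or.inr ⟨r', ?_⟩
            have := dropWhile_head_false _ t d r' (hr_def ▸ hdr)
            simp at this
            rw [this]
        have hsplit : PySem.Chars.split₀ (c :: t) = w :: PySem.Chars.split₀ r := by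
          rw [hn]; exact split0_word w r hwne hwnospace hrshape
        have hg2 : g2 true (c :: t) = w ++ g2 false r := by
          rw [hn]; exact g2_word w hwne hwns true r
        have hnall : ¬ (∀ x ∈ c :: t, x = ' ') := fun h => hs (h c List.mem_cons_self)
        have hsplitne : PySem.Chars.split₀ (c :: t) ≠ [] := by rw [hsplit]; simp
        refine ⟨?_, by constructor <;> intro h <;> [exact absurd h hsplitne; exact absurd h hnall]⟩
        rcases hrshape with hr | ⟨r', hr⟩
        · -- no space after the word
          rw [hg2, hr, hsplit, hr]
          show (List.dropWhile pU (w ++ g2 true []).reverse).reverse = _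
          simp only [g2, List.append_nil]
          rw [dropU_rev_word w hwpU]
          simp [PySem.Chars.split₀, PySem.Chars.split₀.go, PySem.Chars.join_singleton]
        · have hrlen : r'.length ≤ N := by
            have h1 : r.length ≤ t.length := by
              rw [hr_def]; exact (List.dropWhile_sublist _).length_le
            rw [hr] at h1; simp at h1; omega
          have hrok : ∀ x ∈ r', CharOK x := by
            intro x hx
            have hxr : x ∈ r := by rw [hr]; exact List.mem_cons_of_mem _ hx
            rw [hr_def] at hxr
            exact hokt x ((List.dropWhile_sublist _).mem hxr)
          obtain ⟨ih1, ih2⟩ := ih r' hrlen hrok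
          rw [hg2, hr, g2_space_false, hsplit, hr, split0_cons_space]
          by_cases hall : ∀ x ∈ r', x = ' '
          · rw [g2_all_space r' hall, ih2.mpr hall]
            show (List.dropWhile pU (w ++ ['_']).reverse).reverse = _
            rw [List.reverse_append]
            simp only [List.reverse_cons, List.reverse_nil, List.nil_append, List.singleton_append]
            rw [List.dropWhile_cons_of_pos (by simp [pU]), dropU_rev_word w hwpU]
            simp [PySem.Chars.join_singleton]
          · push Not at hall
            obtain ⟨c₀, hc₀, hc₀ne⟩ := hall
            have hsne : PySem.Chars.split₀ r' ≠ [] := fun h => hc₀ne (ih2.mp h c₀ hc₀)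
            have hdne : List.dropWhile pU (g2 true r').reverse ≠ [] := by
              intro h
              have hall2 := List.dropWhile_eq_nil_iff.mp h
              have : c₀ ∈ (g2 true r').reverse := by
                rw [List.mem_reverse]; exact g2_mem r' c₀ hc₀ hc₀ne true
              have := hall2 c₀ this
              rw [pU_false c₀ (charOK_letter c₀ (hrok c₀ hc₀) hc₀ne).1] at this
              simp at this
            rw [List.reverse_append, List.reverse_cons]
            have hinner : List.dropWhile pU ((g2 true r').reverse ++ ['_'])
                = List.dropWhile pU (g2 true r').reverse ++ ['_'] := by
              rw [List.dropWhile_append, if_neg (by simpa [List.isEmpty_iff] using hdne)]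
            rw [List.dropWhile_append, hinner, if_neg (by simp)]
            cases hsp : PySem.Chars.split₀ r' with
            | nil => exact absurd hsp hsne
            | cons p ps =>
              rw [PySem.Chars.join_cons_cons, ← hsp, ← ih1]
              simp

theorem splitOn_go_head (fuel : Nat) : ∀ (l cur : List Char) (accs : List (List Char)),
    l.length ≤ fuel →
    ∃ tail, PySem.Chars.splitOn.go ['\t'] fuel l cur accs =
      accs.reverse ++ (cur.reverse ++ l.takeWhile (· ≠ '\t')) :: tail := by
  induction fuel with
  | zero =>
    intro l cur accs hlen
    have : l = [] := List.eq_nil_of_length_eq_zero (Nat.le_zero.mp hlen)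
    subst this
    exact ⟨[], by simp [PySem.Chars.splitOn.go]⟩
  | succ fuel ih =>
    intro l cur accs hlen
    cases l with
    | nil => exact ⟨[], by simp [PySem.Chars.splitOn.go]⟩
    | cons c rest =>
      have hrl : rest.length ≤ fuel := by simpa using hlen
      by_cases hc : c = '\t'
      · subst hc
        obtain ⟨tail, htail⟩ := ih rest [] (cur.reverse :: accs) hrl
        refine ⟨rest.takeWhile (· ≠ '\t') :: tail, ?_⟩
        simp only [PySem.Chars.splitOn.go]
        rw [if_pos (by simp [List.isPrefixOf])]
        have hdrop : List.drop (['\t'] : List Char).length ('\t' :: rest) = rest := by simp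
        rw [hdrop, htail, List.takeWhile_cons_of_neg (by simp)]
        simp
      · obtain ⟨tail, htail⟩ := ih rest (c :: cur) accs hrl
        refine ⟨tail, ?_⟩
        simp only [PySem.Chars.splitOn.go]
        rw [if_neg (by simp [List.isPrefixOf]; exact fun h => hc h.symm)]
        rw [htail, List.takeWhile_cons_of_pos (by simp [hc])]
        simp

theorem head_splitOn_tab (cs : List Char) :
    (PySem.Chars.splitOn cs ['\t']).headD [] = cs.takeWhile (· ≠ '\t') := by
  obtain ⟨tail, htail⟩ := splitOn_go_head (cs.length + 1) cs [] [] (by omega)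
  rw [PySem.Chars.splitOn]
  simp at htail
  rw [htail]
  simp only [List.headD_cons]
  congr 1
  funext x
  simp

theorem ports_agree (df : String) : deduce_id df = deduce_id_alt df := by
  rw [deduce_id, deduce_id_alt]
  have hhead : ((PySem.Chars.split? df.toList ['\t']).getD []).headD []
      = df.toList.takeWhile (· ≠ '\t') := by
    rw [PySem.Chars.split?, if_neg (by simp)]
    simp only [Option.getD_some]
    exact head_splitOn_tab df.toList
  rw [hhead]
  congr 1
  rw [deduceLoop_eq, show PySem.Chars.endswith ([] : List Char) ['_'] = false from by decide,
      List.nil_append, gRun_takeWhile]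
  have htf : ∀ x ∈ df.toList.takeWhile (· ≠ '\t'), x ≠ '\t' := fun x hx => by
    simpa using List.mem_takeWhile_imp hx
  rw [gRun_eq_g2 _ htf]
  show (List.dropWhile pU (List.dropWhile pU
      (g2 false (normB (df.toList.takeWhile (· ≠ '\t'))))).reverse).reverse = _
  rw [dropU_g2_false _ (normB_ok _)]
  rw [(main_lemma (normB (df.toList.takeWhile (· ≠ '\t'))).length _ le_rfl (normB_ok _)).1]
  rfl

-- ===== VERDICT (by name: the statement is the Claim_ definition above) =====
theorem deduce_id_spec : Claim_equal_deduce_id := by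
  intro df _
  unfold Spec_deduce_id
  exact ports_agree df
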